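-- pv_equiv track=rewrite | github.com/khel-kim/CodingPractice | Programmers/simulation/42891.py | solution
-- ===== SOURCE A (Python) =====
-- def solution(food_times, k):
--     if k < len(food_times):
--         return k + 1
--     maximum = 0
--     summation = 0
--     for i in food_times:
--         summation += i
--         if maximum < i:
--             maximum = i
--     if k >= summation:
--         return -1
--     else:
--         n = len(food_times)
--         board = [[0] * maximum for _ in range(n)]
--         count = 1
--         for y in range(maximum):
--             x = 0
--             remove_index = []
--             while x < n:
--                 if y < food_times[x]:
--                     if count == k + 1:
--                         return board[x][0]
--                     board[x][y] = count
--                     count += 1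
--                 else:
--                     remove_index.append(x)
--                 x += 1
--             if remove_index:
--                 tmp = 0
--                 for j in remove_index:
--                     food_times.pop(j - tmp)
--                     board.pop(j - tmp)
--                     tmp += 1
--             n = len(food_times)
-- ===== SOURCE B (Python) =====
-- def solution(food_times, k):
--     n = len(food_times)
--     if k < n:
--         return k + 1
--     if k >= sum(food_times):
--         return -1
--
--     def eaten(r):
--         # seconds spent during the first r full rounds
--         return sum(min(t, r) for t in food_times if t > 0)
--
--     # binary search the round r (1-based) during which second k+1 happens
--     lo, hi = 1, max(food_times)
--     while lo < hi:
--         mid = (lo + hi) // 2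
--         if eaten(mid) > k:
--             hi = mid
--         else:
--             lo = mid + 1
--     r = lo
--     offset = k - eaten(r - 1)
--     alive = [i for i, t in enumerate(food_times) if t >= r]
--     return alive[offset] + 1
-- ===== Notes on version B (the rewrite author's own statement) =====
-- stated objective: alternative
-- what changed: Replaces the per-second n x max board simulation (a matrix mutated round by round, with in-place pops) with arithmetic: a binary search over rounds on the monotone count sum(min(t,r)) locates the round of second k+1, then the answer dish is read off by position among the still-alive dishes.
-- outside the precondition, e.g. on solution([0, 3, 3], 3): A returns 2, B returns 3
import Mathlib
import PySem

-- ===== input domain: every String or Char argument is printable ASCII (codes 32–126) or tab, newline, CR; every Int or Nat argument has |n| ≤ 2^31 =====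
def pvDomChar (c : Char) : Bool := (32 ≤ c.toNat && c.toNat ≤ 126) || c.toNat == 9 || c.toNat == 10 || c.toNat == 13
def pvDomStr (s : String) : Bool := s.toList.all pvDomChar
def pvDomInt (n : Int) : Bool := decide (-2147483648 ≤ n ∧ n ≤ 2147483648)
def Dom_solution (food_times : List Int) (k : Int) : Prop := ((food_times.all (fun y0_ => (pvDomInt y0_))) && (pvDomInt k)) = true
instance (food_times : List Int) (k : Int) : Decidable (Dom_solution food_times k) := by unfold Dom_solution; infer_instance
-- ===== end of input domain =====

-- B replaces A's second-by-second board simulation by a binary search over rounds on the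
-- monotone eaten-count; equivalence is about the RETURN value only (Python A pops from its
-- food_times argument in place, B does not mutate it).

-- ===== PORT A =====
-- inner 'while x < n' loop: scans food_times/board in parallel (they always have equal
-- length in A), threading count and remove_index; .error = the early 'return board[x][0]'.
-- board[x][0] is read with getD (in A's reachable states rows are nonempty: maximum ≥ 1).
def aWhile (k y : Int) : List Int → List (List Int) → Int → Int → List Int →
    Except Int (List (List Int) × Int × List Int)
  | t :: fs, row :: rows, x, count, rem =>
    if y < t then
      if count = k + 1 then .error (row.getD 0 0)
      else
        match aWhile k y fs rows (x + 1) (count + 1) rem with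
        | .error v => .error v
        | .ok (bs, c, r) => .ok (row.set y.toNat count :: bs, c, r)
    else
      match aWhile k y fs rows (x + 1) count (rem ++ [x]) with
      | .error v => .error v
      | .ok (bs, c, r) => .ok (row :: bs, c, r)
  | _, _, _, count, rem => .ok ([], count, rem)

-- the 'for j in remove_index: food_times.pop(j - tmp); board.pop(j - tmp); tmp += 1' loop
-- (A's 'if remove_index:' guard only skips an empty loop, a no-op, so it is not re-tested here)
def aPop (rem : List Int) (fts : List Int) (board : List (List Int)) :
    List Int × List (List Int) :=
  (rem.foldl (fun (s : (List Int × List (List Int)) × Int) j =>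
      ((match PySem.List.pop? s.1.1 (j - s.2) with | some p => p.2 | none => s.1.1,
        match PySem.List.pop? s.1.2 (j - s.2) with | some p => p.2 | none => s.1.2),
       s.2 + 1)) ((fts, board), 0)).1

-- 'for y in range(maximum)' with early return; [] = Python's falling off the loop (returns
-- None there; unreachable on the admitted inputs, 0 is a junk default)
def aRounds (k : Int) : List Int → List Int → List (List Int) → Int → Int
  | [], _, _, _ => 0
  | y :: ys, fts, board, count =>
    match aWhile k y fts board 0 count [] with
    | .error v => v
    | .ok (board', c', rem) =>
      let p := aPop rem fts board'
      aRounds k ys p.1 p.2 c'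

def solution (food_times : List Int) (k : Int) : Int :=
  if k < PySem.List.len food_times then k + 1
  else
    -- 'for i in food_times: summation += i; if maximum < i: maximum = i'
    let sm := food_times.foldl (fun (p : Int × Int) i => (p.1 + i, if p.2 < i then i else p.2)) (0, 0)
    if k ≥ sm.1 then -1
    else
      let n := food_times.length
      let board := List.replicate n (List.replicate sm.2.toNat 0)
      aRounds k (PySem.List.pyRange 0 sm.2 1) food_times board 1

-- ===== PORT B =====
-- seconds spent during the first r full rounds: sum(min(t, r) for t in food_times if t > 0)
def eatenB (l : List Int) (r : Int) : Int :=
  ((l.filter (fun t => decide (0 < t))).map (fun t => min t r)).sum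

-- 'while lo < hi: mid = (lo+hi)//2; …' binary search for the first r with eatenB l r > k
def bsB (l : List Int) (k : Int) (lo hi : Int) : Int :=
  if h : lo < hi then
    let mid := PySem.Int.floordiv (lo + hi) 2
    if eatenB l mid > k then bsB l k lo mid else bsB l k (mid + 1) hi
  else lo
termination_by (hi - lo).toNat
decreasing_by
  · have h2 : PySem.Int.floordiv (lo + hi) 2 < hi := by
      rw [PySem.Int.floordiv_lt_iff_lt_mul (by omega)]; omega
    have h1 := (PySem.Int.floordiv_two_mid_bounds (le_of_lt h)).1
    omega
  · have h1 := (PySem.Int.floordiv_two_mid_bounds (le_of_lt h)).1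
    have h2 : PySem.Int.floordiv (lo + hi) 2 < hi := by
      rw [PySem.Int.floordiv_lt_iff_lt_mul (by omega)]; omega
    omega

def solution_alt (food_times : List Int) (k : Int) : Int :=
  if k < PySem.List.len food_times then k + 1
  else if k ≥ food_times.sum then -1
  else
    -- max(food_times): the list is nonempty in this branch, getD 0 is never used
    let r := bsB food_times k 1 ((PySem.List.max? food_times (fun t => t)).getD 0)
    let offset := k - eatenB food_times (r - 1)
    let alive := ((PySem.List.enumerate food_times 0).filter (fun p => decide (r ≤ p.2))).map
      (fun p => p.1)
    (PySem.List.pyGet? alive offset).getD 0 + 1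

-- ===== PRECONDITION & SPEC =====
-- Pre_ only excludes inputs that reach the simulation (n ≤ k < sum) while containing a
-- non-positive eating time: such times lie outside the problem's stated domain
-- (food_times[i] ≥ 1) and there A's dish numbering (rank among the positive dishes) and
-- B's numbering (original position) are both accidental, equally defensible choices.
def Pre_solution (food_times : List Int) (k : Int) : Prop :=
  k < (food_times.length : Int) ∨ food_times.sum ≤ k ∨ ∀ t ∈ food_times, 1 ≤ t
instance (food_times : List Int) (k : Int) : Decidable (Pre_solution food_times k) := by
  unfold Pre_solution; infer_instance

def pvWitness_solution : List Int × Int := ([3, 1, 2], 5)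

def Spec_solution (food_times : List Int) (k : Int) (out : Int) : Prop := out = solution_alt food_times k
instance (food_times : List Int) (k : Int) (out : Int) : Decidable (Spec_solution food_times k out) := by unfold Spec_solution; infer_instance

-- ===== CLAIM (what is proved, stated in full; the proofs are below) =====
def Claim_equal_solution : Prop := ∀ (food_times : List Int) (k : Int), Dom_solution food_times k → Pre_solution food_times k → Spec_solution food_times k (solution food_times k)

-- ===== LEMMAS AND PROOFS =====

-- seconds spent during the first y full rounds (A's count minus 1, B's eatenB on positive lists)
def Scnt (l : List Int) (y : Int) : Int := (l.map (fun t => min t y)).sum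

-- the dishes still on the table after round y (0-based), with their original indices
def aliveP (l : List Int) (y : Int) : List (Int × Int) :=
  (PySem.List.enumerate l 0).filter (fun p => decide (y < p.2))

-- offsets (from x) of the dishes a round flags for removal
def failIdx (y x : Int) : List Int → List Int
  | [] => []
  | t :: fs => if y < t then failIdx y (x + 1) fs else x :: failIdx y (x + 1) fs

-- the board rows at surviving positions
def selB (y : Int) : List Int → List (List Int) → List (List Int)
  | t :: fs, r :: rs => if y < t then r :: selB y fs rs else selB y fs rs
  | _, _ => []

lemma Scnt_mono (l : List Int) {y z : Int} (h : y ≤ z) : Scnt l y ≤ Scnt l z := by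
  induction l with
  | nil => simp [Scnt]
  | cons t l ih =>
    simp only [Scnt, List.map_cons, List.sum_cons] at *
    have : min t y ≤ min t z := by omega
    omega

lemma Scnt_succ (l : List Int) (y : Int) :
    Scnt l (y + 1) = Scnt l y + (l.countP (fun t => decide (y < t)) : Int) := by
  induction l with
  | nil => simp [Scnt]
  | cons t l ih =>
    simp only [Scnt, List.map_cons, List.sum_cons, List.countP_cons] at *
    by_cases h : y < t
    · simp [h]; push_cast; omega
    · simp [h]; omega

lemma Scnt_zero (l : List Int) (hl : ∀ t ∈ l, 1 ≤ t) : Scnt l 0 = 0 := by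
  induction l with
  | nil => simp [Scnt]
  | cons t l ih =>
    have h1 := hl t (by simp)
    simp only [Scnt, List.map_cons, List.sum_cons] at *
    rw [ih (fun t ht => hl t (by simp [ht]))]
    omega

lemma Scnt_top (l : List Int) (M : Int) (hM : ∀ t ∈ l, t ≤ M) : Scnt l M = l.sum := by
  induction l with
  | nil => simp [Scnt]
  | cons t l ih =>
    have h1 := hM t (by simp)
    simp only [Scnt, List.map_cons, List.sum_cons] at *
    rw [ih (fun t ht => hM t (by simp [ht]))]
    omega

lemma length_aliveP (l : List Int) (y : Int) :
    ((aliveP l y).length : Int) = (l.countP (fun t => decide (y < t)) : Int) := by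
  have aux : ∀ (l : List Int) (s : Int),
      ((PySem.List.enumerate l s).filter (fun p => decide (y < p.2))).length =
        l.countP (fun t => decide (y < t)) := by
    intro l
    induction l with
    | nil => intro s; simp [PySem.List.enumerate_nil]
    | cons t l ih =>
      intro s
      rw [PySem.List.enumerate_cons]
      by_cases h : y < t
      · simp [List.filter_cons, List.countP_cons, h, ih]
      · simp [List.filter_cons, List.countP_cons, h, ih]
  unfold aliveP
  rw [aux]

lemma eatenB_eq (l : List Int) (r : Int) (hl : ∀ t ∈ l, 1 ≤ t) : eatenB l r = Scnt l r := by
  unfold eatenB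
  rw [List.filter_eq_self.2 (fun t ht => by simpa using by have := hl t ht; omega)]
  rfl

lemma bsB_spec (l : List Int) (k : Int) (hl : ∀ t ∈ l, 1 ≤ t) :
    ∀ lo hi, lo ≤ hi → Scnt l (lo - 1) ≤ k → k < Scnt l hi →
      lo ≤ bsB l k lo hi ∧ bsB l k lo hi ≤ hi ∧
        Scnt l (bsB l k lo hi - 1) ≤ k ∧ k < Scnt l (bsB l k lo hi) := by
  have main : ∀ (n : Nat) (lo hi : Int), (hi - lo).toNat = n → lo ≤ hi →
      Scnt l (lo - 1) ≤ k → k < Scnt l hi →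
      lo ≤ bsB l k lo hi ∧ bsB l k lo hi ≤ hi ∧
        Scnt l (bsB l k lo hi - 1) ≤ k ∧ k < Scnt l (bsB l k lo hi) := by
    intro n
    induction n using Nat.strong_induction_on with
    | _ n ih =>
      intro lo hi hn hlh hlo hhi
      by_cases h : lo < hi
      · have hm := PySem.Int.floordiv_two_mid_bounds (le_of_lt h)
        have hm2 : PySem.Int.floordiv (lo + hi) 2 < hi := by
          rw [PySem.Int.floordiv_lt_iff_lt_mul (by omega)]; omega
        set mid := PySem.Int.floordiv (lo + hi) 2 with hmid
        rw [bsB, dif_pos h]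
        simp only [← hmid]
        by_cases hgt : eatenB l mid > k
        · rw [if_pos hgt]
          rw [eatenB_eq l mid hl] at hgt
          have := ih (mid - lo).toNat (by omega) lo mid rfl hm.1 hlo hgt
          exact ⟨this.1, by omega, this.2.2⟩
        · rw [if_neg hgt]
          rw [eatenB_eq l mid hl] at hgt
          have := ih (hi - (mid + 1)).toNat (by omega) (mid + 1) hi rfl (by omega)
            (by simpa using by omega) hhi
          exact ⟨by omega, this.2⟩
      · rw [bsB, dif_neg h]
        have : lo = hi := by omega
        subst this
        exact ⟨le_refl _, le_refl _, hlo, hhi⟩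
  intro lo hi
  exact main (hi - lo).toNat lo hi rfl

lemma aWhile_zero (k : Int) : ∀ (fs : List Int) (rows : List (List Int)) (x count : Int)
    (rem : List Int), (∀ t ∈ fs, 1 ≤ t) → (∀ row ∈ rows, row ≠ []) →
    rows.length = fs.length → count + (fs.length : Int) ≤ k + 1 →
    ∃ bs', aWhile k 0 fs rows x count rem = .ok (bs', count + fs.length, rem) ∧
      bs'.map (fun r => r.getD 0 0) = (List.range fs.length).map (fun i : Nat => count + (i : Int)) := by
  intro fs
  induction fs with
  | nil =>
    intro rows x count rem _ _ hlen _
    have : rows = [] := List.eq_nil_of_length_eq_zero (by simpa using hlen)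
    subst this
    exact ⟨[], by simp [aWhile], by simp⟩
  | cons t fs ih =>
    intro rows x count rem hpos hne hlen hcnt
    match rows with
    | [] => simp at hlen
    | row :: rows =>
      have ht : (0 : Int) < t := by have := hpos t (by simp); omega
      have hck : ¬ count = k + 1 := by
        simp only [List.length_cons] at hcnt
        push_cast at hcnt
        omega
      obtain ⟨bs', heq, hheads⟩ := ih rows (x + 1) (count + 1) rem
        (fun u hu => hpos u (by simp [hu])) (fun r hr => hne r (by simp [hr]))
        (by simpa using hlen) (by simp only [List.length_cons] at hcnt; push_cast at hcnt ⊢; omega)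
      refine ⟨row.set 0 count :: bs', ?_, ?_⟩
      · rw [aWhile, if_pos ht, if_neg hck, heq]
        simp only [Int.toNat_zero, List.length_cons]
        have : count + 1 + (fs.length : Int) = count + ((fs.length : Int) + 1) := by omega
        rw [show ((fs.length + 1 : Nat) : Int) = (fs.length : Int) + 1 by push_cast; ring, ← this]
      · have hrow : (row.set 0 count).getD 0 0 = count := by
          have : row ≠ [] := hne row (by simp)
          match row with
          | a :: r => simp
        simp only [List.map_cons, hrow, hheads, List.length_cons, List.range_succ_eq_map,
          List.map_cons, List.map_map, List.cons.injEq]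
        refine ⟨by simp, ?_⟩
        apply List.map_congr_left
        intro a _
        simp only [Function.comp_apply]
        push_cast
        omega

lemma aWhile_pos (k y : Int) (hy : 1 ≤ y) : ∀ (pairs : List (Int × Int))
    (bs : List (List Int)) (x count : Int) (rem : List Int),
    bs.map (fun r => r.getD 0 0) = pairs.map (fun p => p.1 + 1) →
    count ≤ k + 1 →
    (if k + 1 < count + ((pairs.filter (fun p => decide (y < p.2))).length : Int)
     then aWhile k y (pairs.map (·.2)) bs x count rem =
       .error (((pairs.filter (fun p => decide (y < p.2))).map (fun p => p.1 + 1)).getD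
         (k + 1 - count).toNat 0)
     else ∃ bs', aWhile k y (pairs.map (·.2)) bs x count rem =
         .ok (bs', count + (pairs.filter (fun p => decide (y < p.2))).length,
              rem ++ failIdx y x (pairs.map (·.2))) ∧
       bs'.map (fun r => r.getD 0 0) = pairs.map (fun p => p.1 + 1)) := by
  intro pairs
  induction pairs with
  | nil =>
    intro bs x count rem hheads hcnt
    have hbs : bs = [] := by simpa using congrArg List.length hheads
    subst hbs
    rw [if_neg (by simp; omega)]
    exact ⟨[], by simp [aWhile, failIdx], by simp⟩
  | cons p ps ih =>
    intro bs x count rem hheads hcnt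
    match bs with
    | [] => simp at hheads
    | row :: brs =>
      simp only [List.map_cons, List.cons.injEq] at hheads
      obtain ⟨hrow, hheads⟩ := hheads
      by_cases hal : y < p.2
      · -- dish alive this round
        by_cases hck : count = k + 1
        · -- immediate return
          rw [if_pos (by simp [List.filter_cons, hal]; omega)]
          show aWhile k y (p.2 :: ps.map (·.2)) (row :: brs) x count rem = _
          rw [aWhile, if_pos hal, if_pos hck]
          simp [List.filter_cons, hal, hck]
          simpa [List.getD] using hrow
        · have hcnt' : count + 1 ≤ k + 1 := by omega
          have := ih brs (x + 1) (count + 1) rem hheads hcnt'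
          by_cases herr : k + 1 < count + 1 + (((ps.filter (fun p => decide (y < p.2))).length) : Int)
          · rw [if_pos herr] at this
            rw [if_pos (by simp [List.filter_cons, hal]; push_cast; omega)]
            show aWhile k y (p.2 :: ps.map (·.2)) (row :: brs) x count rem = _
            rw [aWhile, if_pos hal, if_neg hck, this]
            simp only [List.filter_cons, hal, decide_true, if_true, List.map_cons]
            congr 1
            have h1 : (k + 1 - count).toNat = (k + 1 - (count + 1)).toNat + 1 := by omega
            rw [h1]
            simp
          · rw [if_neg herr] at this
            obtain ⟨bs', hok, hh⟩ := this
            rw [if_neg (by simp [List.filter_cons, hal]; push_cast; omega)]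
            refine ⟨row.set y.toNat count :: bs', ?_, ?_⟩
            · show aWhile k y (p.2 :: ps.map (·.2)) (row :: brs) x count rem = _
              rw [aWhile, if_pos hal, if_neg hck, hok]
              simp only [List.filter_cons, hal, decide_true, if_true, List.length_cons,
                List.map_cons]
              rw [show failIdx y x (p.2 :: ps.map (·.2)) = failIdx y (x + 1) (ps.map (·.2)) from by
                rw [failIdx]; simp [hal]]
              congr 3
              push_cast
              omega
            · simp only [List.map_cons, hh, List.filter_cons, hal, decide_true, if_true]
              congr 1
              rw [← hrow]
              have hy0 : y.toNat ≠ 0 := by omega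
              rcases row with _ | ⟨a, r⟩
              · simp
              · cases hn : y.toNat with
                | zero => omega
                | succ m => simp [hn]
      · -- dish flagged for removal
        have := ih brs (x + 1) count (rem ++ [x]) hheads hcnt
        by_cases herr : k + 1 < count + (((ps.filter (fun p => decide (y < p.2))).length) : Int)
        · rw [if_pos herr] at this
          rw [if_pos (by simpa [List.filter_cons, hal] using herr)]
          show aWhile k y (p.2 :: ps.map (·.2)) (row :: brs) x count rem = _
          rw [aWhile, if_neg hal, this]
          simp [List.filter_cons, hal]
        · rw [if_neg herr] at this
          obtain ⟨bs', hok, hh⟩ := this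
          rw [if_neg (by simpa [List.filter_cons, hal] using herr)]
          refine ⟨row :: bs', ?_, ?_⟩
          · show aWhile k y (p.2 :: ps.map (·.2)) (row :: brs) x count rem = _
            rw [aWhile, if_neg hal, hok]
            simp only [List.map_cons]
            rw [show failIdx y x (p.2 :: ps.map (·.2)) = x :: failIdx y (x + 1) (ps.map (·.2)) from by
              rw [failIdx]; simp [hal]]
            simp [List.filter_cons, hal]
          · simp only [List.map_cons, List.filter_cons, hal, decide_false, Bool.false_eq_true,
              if_false, List.cons.injEq]
            exact ⟨by simpa [List.getD] using hrow, by simpa [List.getD] using hh⟩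

lemma pop2_at_len {α : Type} (A : List α) (t : α) (l : List α) :
    PySem.List.pop? (A ++ t :: l) ((A.length : Int)) = some (t, A ++ l) := by
  rw [PySem.List.pop?_natCast (A ++ t :: l) A.length (by simp)]
  simp [List.getElem_append_right, List.eraseIdx_append_of_length_le (le_refl A.length)]

lemma aPop_go (y : Int) : ∀ (fs : List Int) (bs keptB : List (List Int)) (keptF : List Int)
    (tmp : Int), bs.length = fs.length → keptB.length = keptF.length →
    ((failIdx y (tmp + keptF.length) fs).foldl
      (fun (s : (List Int × List (List Int)) × Int) j =>
        ((match PySem.List.pop? s.1.1 (j - s.2) with | some p => p.2 | none => s.1.1,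
          match PySem.List.pop? s.1.2 (j - s.2) with | some p => p.2 | none => s.1.2),
         s.2 + 1)) ((keptF ++ fs, keptB ++ bs), tmp)).1
      = (keptF ++ fs.filter (fun t => decide (y < t)), keptB ++ selB y fs bs) := by
  intro fs
  induction fs with
  | nil =>
    intro bs keptB keptF tmp hlen _
    have : bs = [] := List.eq_nil_of_length_eq_zero (by simpa using hlen)
    subst this
    simp [failIdx, selB]
  | cons t fs ih =>
    intro bs keptB keptF tmp hlen hklen
    match bs with
    | [] => simp at hlen
    | row :: brs =>
      by_cases hal : y < t
      · rw [show failIdx y (tmp + keptF.length) (t :: fs) =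
            failIdx y (tmp + keptF.length + 1) fs from by rw [failIdx]; simp [hal]]
        have h1 : tmp + (keptF ++ [t]).length = tmp + keptF.length + 1 := by simp; omega
        have := ih brs (keptB ++ [row]) (keptF ++ [t]) tmp (by simpa using hlen)
          (by simp [hklen])
        rw [h1] at this
        simp only [List.append_assoc, List.singleton_append] at this
        rw [this]
        simp [List.filter_cons, hal, selB]
      · rw [show failIdx y (tmp + keptF.length) (t :: fs) =
            (tmp + keptF.length) :: failIdx y (tmp + keptF.length + 1) fs from by
          rw [failIdx]; simp [hal]]
        rw [List.foldl_cons]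
        have hidx : tmp + (keptF.length : Int) - tmp = (keptF.length : Int) := by omega
        simp only [hidx, pop2_at_len]
        rw [show PySem.List.pop? (keptB ++ row :: brs) ((keptF.length : Int)) =
            some (row, keptB ++ brs) from by rw [← hklen]; push_cast; exact pop2_at_len _ _ _]
        have := ih brs keptB keptF (tmp + 1) (by simpa using hlen) hklen
        rw [show tmp + 1 + (keptF.length : Int) = tmp + (keptF.length : Int) + 1 from by omega]
          at this
        rw [this]
        simp [List.filter_cons, hal, selB]

lemma selB_heads (y : Int) : ∀ (pairs : List (Int × Int)) (bs : List (List Int)),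
    bs.map (fun r => r.getD 0 0) = pairs.map (fun p => p.1 + 1) →
    (selB y (pairs.map (·.2)) bs).map (fun r => r.getD 0 0) =
      (pairs.filter (fun p => decide (y < p.2))).map (fun p => p.1 + 1) := by
  intro pairs
  induction pairs with
  | nil =>
    intro bs h
    have : bs = [] := by simpa using congrArg List.length h
    subst this
    simp [selB]
  | cons p ps ih =>
    intro bs h
    match bs with
    | [] => simp at h
    | row :: brs =>
      simp only [List.map_cons, List.cons.injEq] at h
      by_cases hal : y < p.2
      · simp only [List.map_cons, selB, hal, if_true, List.filter_cons, decide_true,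
          List.cons.injEq]
        exact ⟨by simpa [List.getD] using h.1, by simpa [List.getD] using ih brs h.2⟩
      · simp only [List.map_cons, selB, hal, if_false, List.filter_cons, decide_false,
          Bool.false_eq_true]
        simpa [List.getD] using ih brs h.2

lemma aliveP_filter (l : List Int) (y : Int) :
    (aliveP l (y - 1)).filter (fun p => decide (y < p.2)) = aliveP l y := by
  unfold aliveP
  rw [List.filter_filter]
  congr 1
  funext q
  by_cases h : y < q.2
  · simp [h]; omega
  · simp [h]

lemma filter_map_snd (pairs : List (Int × Int)) (y : Int) :
    (pairs.map (·.2)).filter (fun t => decide (y < t)) =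
      (pairs.filter (fun p => decide (y < p.2))).map (·.2) := by
  rw [List.filter_map]
  rfl

lemma aPop_top (y : Int) (fs : List Int) (bs : List (List Int)) (h : bs.length = fs.length) :
    aPop (failIdx y 0 fs) fs bs = (fs.filter (fun t => decide (y < t)), selB y fs bs) := by
  have := aPop_go y fs bs [] [] 0 h rfl
  simpa [aPop] using this

lemma aRounds_eq (l : List Int) (k M r : Int) (hl : ∀ t ∈ l, 1 ≤ t) (hrM : r ≤ M)
    (hr1 : Scnt l (r - 1) ≤ k) (hr2 : k < Scnt l r) :
    ∀ (y : Int) (bs : List (List Int)), 1 ≤ y → y ≤ r - 1 →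
      bs.map (fun rw => rw.getD 0 0) = (aliveP l (y - 1)).map (fun p => p.1 + 1) →
      aRounds k (PySem.List.pyRange y M 1) ((aliveP l (y - 1)).map (·.2)) bs (1 + Scnt l y) =
        ((aliveP l (r - 1)).map (fun p => p.1 + 1)).getD (k - Scnt l (r - 1)).toNat 0 := by
  have main : ∀ (n : Nat) (y : Int) (bs : List (List Int)), (r - 1 - y).toNat = n →
      1 ≤ y → y ≤ r - 1 →
      bs.map (fun rw => rw.getD 0 0) = (aliveP l (y - 1)).map (fun p => p.1 + 1) →
      aRounds k (PySem.List.pyRange y M 1) ((aliveP l (y - 1)).map (·.2)) bs (1 + Scnt l y) =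
        ((aliveP l (r - 1)).map (fun p => p.1 + 1)).getD (k - Scnt l (r - 1)).toNat 0 := by
    intro n
    induction n using Nat.strong_induction_on with
    | _ n ih =>
      intro y bs hn hy1 hyr hheads
      have hyM : y < M := by omega
      rw [PySem.List.pyRange_one_cons hyM]
      show aRounds k (y :: PySem.List.pyRange (y + 1) M 1) _ _ _ = _
      have hcle : 1 + Scnt l y ≤ k + 1 := by
        have := Scnt_mono l (show y ≤ r - 1 by omega)
        omega
      have hw := aWhile_pos k y (by omega) (aliveP l (y - 1)) bs 0 (1 + Scnt l y) []
        hheads hcle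
      have hlen : (((aliveP l (y - 1)).filter (fun p => decide (y < p.2))).length : Int) =
          Scnt l (y + 1) - Scnt l y := by
        rw [aliveP_filter, length_aliveP, Scnt_succ]
        omega
      by_cases hlast : y = r - 1
      · subst hlast
        rw [if_pos (by
          rw [hlen]
          have h5 : Scnt l (r - 1 + 1) = Scnt l r := by congr 1; omega
          omega)] at hw
        rw [aRounds, hw]
        show (((aliveP l (r - 1 - 1)).filter (fun p => decide (r - 1 < p.2))).map
            (fun p => p.1 + 1)).getD (k + 1 - (1 + Scnt l (r - 1))).toNat 0 = _
        rw [aliveP_filter]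
        congr 1
        omega
      · rw [if_neg (by
          rw [hlen]
          have h1 : y + 1 ≤ r - 1 := by omega
          have := Scnt_mono l h1
          omega)] at hw
        obtain ⟨bs', hok, hh⟩ := hw
        have hlenbs : bs'.length = ((aliveP l (y - 1)).map (·.2)).length := by
          have h6 := congrArg List.length hh
          simpa using h6
        rw [aRounds, hok]
        show aRounds k (PySem.List.pyRange (y + 1) M 1)
            (aPop ([] ++ failIdx y 0 ((aliveP l (y - 1)).map (·.2)))
              ((aliveP l (y - 1)).map (·.2)) bs').1
            (aPop ([] ++ failIdx y 0 ((aliveP l (y - 1)).map (·.2)))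
              ((aliveP l (y - 1)).map (·.2)) bs').2
            (1 + Scnt l y +
              (((aliveP l (y - 1)).filter (fun p => decide (y < p.2))).length : Int)) = _
        rw [List.nil_append, aPop_top y _ bs' hlenbs, filter_map_snd, aliveP_filter]
        have hsel : (selB y ((aliveP l (y - 1)).map (·.2)) bs').map (fun r => r.getD 0 0) =
            (aliveP l y).map (fun p => p.1 + 1) := by
          rw [← aliveP_filter l y]
          exact selB_heads y (aliveP l (y - 1)) bs' hh
        have hcnt : 1 + Scnt l y + ((aliveP l y).length : Int) = 1 + Scnt l (y + 1) := by
          rw [length_aliveP, Scnt_succ]; omega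
        rw [hcnt]
        have hstep := ih (r - 1 - (y + 1)).toNat (by omega) (y + 1)
          (selB y ((aliveP l (y - 1)).map (·.2)) bs') rfl (by omega) (by omega)
          (by rw [show y + 1 - 1 = y from by omega]; exact hsel)
        rw [show y + 1 - 1 = y from by omega] at hstep
        exact hstep
  intro y bs
  exact main (r - 1 - y).toNat y bs rfl

lemma foldl_pair (l : List Int) : ∀ s m : Int,
    l.foldl (fun (p : Int × Int) i => (p.1 + i, if p.2 < i then i else p.2)) (s, m) =
      (s + l.sum, l.foldl (fun a i => if a < i then i else a) m) := by
  induction l with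
  | nil => intro s m; simp
  | cons t l ih => intro s m; simp only [List.foldl_cons, List.sum_cons, ih]; congr 1; omega

lemma foldl_ite_eq_max (l : List Int) (m : Int) :
    l.foldl (fun a i => if a < i then i else a) m = l.foldl max m := by
  have h : (fun (a i : Int) => if a < i then i else a) = max := by
    funext a i
    rw [max_def]
    split_ifs <;> omega
  rw [h]

lemma max?_getD_eq (x : Int) (t : List Int) (hx : 1 ≤ x) :
    (PySem.List.max? (x :: t) (fun v => v)).getD 0 = (x :: t).foldl max 0 := by
  rw [PySem.List.max?_id_cons]
  simp only [Option.getD_some, List.foldl_cons]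
  rw [max_eq_right (by omega : (0 : Int) ≤ x)]

lemma Scnt_one (l : List Int) (hl : ∀ t ∈ l, 1 ≤ t) : Scnt l 1 = (l.length : Int) := by
  have h := Scnt_succ l 0
  rw [Scnt_zero l hl] at h
  simp only [zero_add] at h
  rw [h, List.countP_eq_length.2 (fun t ht => by have := hl t ht; simp; omega)]

lemma aliveP_zero (l : List Int) (hl : ∀ t ∈ l, 1 ≤ t) :
    aliveP l 0 = PySem.List.enumerate l 0 := by
  unfold aliveP
  apply List.filter_eq_self.2
  intro p hp
  obtain ⟨j, hj, rfl⟩ := (PySem.List.mem_enumerate_iff _ _ _).1 hp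
  have := hl l[j] (List.getElem_mem hj)
  simp
  omega

lemma enumerate_heads (l : List Int) :
    (PySem.List.enumerate l 0).map (fun p => p.1 + 1) =
      (List.range l.length).map (fun i : Nat => 1 + (i : Int)) := by
  have h1 : (PySem.List.enumerate l 0).map (fun p => p.1 + 1) =
      ((PySem.List.enumerate l 0).map (·.1)).map (fun v => v + 1) := by
    rw [List.map_map]; rfl
  rw [h1, PySem.List.map_fst_enumerate, PySem.List.pyRange_one, List.map_map]
  rw [show ((0 : Int) + l.length - 0).toNat = l.length from by omega]
  apply List.map_congr_left
  intro a _
  simp only [Function.comp_apply]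
  omega

-- ===== VERDICT (by name: the statement is the Claim_ definition above) =====
lemma b_value (l : List Int) (k r : Int) (hl : ∀ t ∈ l, 1 ≤ t)
    (hr1 : Scnt l (r - 1) ≤ k) (hr2 : k < Scnt l r) :
    (PySem.List.pyGet? (((PySem.List.enumerate l 0).filter
        (fun p => decide (r ≤ p.2))).map (fun p => p.1)) (k - eatenB l (r - 1))).getD 0 + 1 =
      ((aliveP l (r - 1)).map (fun p => p.1 + 1)).getD (k - Scnt l (r - 1)).toNat 0 := by
  have hpred : (fun p : Int × Int => decide (r ≤ p.2)) =
      (fun p : Int × Int => decide (r - 1 < p.2)) := by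
    funext q
    simp only [decide_eq_decide]
    omega
  rw [hpred, eatenB_eq l (r - 1) hl]
  have hF : ((PySem.List.enumerate l 0).filter (fun p => decide (r - 1 < p.2))) =
      aliveP l (r - 1) := rfl
  rw [hF]
  set F := aliveP l (r - 1) with hFdef
  set j := k - Scnt l (r - 1) with hjdef
  have hj0 : 0 ≤ j := by omega
  have hjlen : j.toNat < F.length := by
    have hc : (F.length : Int) = Scnt l (r - 1 + 1) - Scnt l (r - 1) := by
      rw [hFdef, length_aliveP, Scnt_succ]; omega
    have : Scnt l (r - 1 + 1) = Scnt l r := by congr 1; omega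
    omega
  rw [PySem.List.pyGet?_of_nonneg _ hj0]
  rw [List.getElem?_map]
  rw [List.getElem?_eq_getElem hjlen]
  simp only [Option.map_some, Option.getD_some]
  rw [List.getD_eq_getElem?_getD, List.getElem?_map, List.getElem?_eq_getElem hjlen]
  simp

theorem solution_spec : Claim_equal_solution := by
  unfold Claim_equal_solution
  intro l k _hdom hpre
  unfold Spec_solution solution solution_alt
  simp only [PySem.List.len_eq]
  by_cases h1 : k < (l.length : Int)
  · rw [if_pos h1, if_pos h1]
  · rw [if_neg h1, if_neg h1, foldl_pair]
    by_cases h2 : k ≥ l.sum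
    · rw [if_pos (by simpa using h2), if_pos h2]
    · rw [if_neg (by simpa using h2), if_neg h2]
      have hl : ∀ t ∈ l, 1 ≤ t := by
        rcases hpre with h | h | h
        · exact absurd h h1
        · exact absurd h (by omega)
        · exact h
      -- the list is nonempty here
      have hne : l ≠ [] := by
        intro hnil
        subst hnil
        simp at h1 h2
        omega
      obtain ⟨t0, l', hldef⟩ := List.exists_cons_of_ne_nil hne
      have ht0 : 1 ≤ t0 := hl t0 (by rw [hldef]; simp)
      simp only [foldl_ite_eq_max]
      set Mx := l.foldl max 0 with hMx
      have hMbounds := PySem.List.le_foldl_max l 0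
      have hMx1 : 1 ≤ Mx := by
        have := hMbounds.2 t0 (by rw [hldef]; simp)
        omega
      have hScntM : Scnt l Mx = l.sum := Scnt_top l Mx hMbounds.2
      -- the binary search bracket
      have hhi : (PySem.List.max? l (fun v => v)).getD 0 = Mx := by
        rw [hMx, hldef]
        exact max?_getD_eq t0 l' ht0
      rw [hhi]
      have hb := bsB_spec l k hl 1 Mx hMx1
        (by rw [show (1 : Int) - 1 = 0 from rfl, Scnt_zero l hl]; omega)
        (by rw [hScntM]; omega)
      set r := bsB l k 1 Mx with hrdef
      obtain ⟨hrlo, hrhi, hr1, hr2⟩ := hb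
      have hr2' : 2 ≤ r := by
        by_contra hcon
        have hreq : r = 1 := by omega
        rw [hreq, Scnt_one l hl] at hr2
        omega
      -- round 0 of A
      have hrange : PySem.List.pyRange 0 Mx 1 = 0 :: PySem.List.pyRange 1 Mx 1 := by
        rw [PySem.List.pyRange_one_cons (by omega)]
        norm_num
      rw [hrange]
      obtain ⟨bs₁, hok, hheads₁⟩ := aWhile_zero k l
        (List.replicate l.length (List.replicate Mx.toNat 0)) 0 1 [] hl
        (fun row hrow => by
          rw [List.eq_of_mem_replicate hrow]
          intro hE
          have hlenE := congrArg List.length hE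
          simp at hlenE
          omega)
        (by simp) (by omega)
      rw [aRounds, hok]
      show aRounds k (PySem.List.pyRange 1 Mx 1) l bs₁ (1 + (l.length : Int)) = _
      have heads1 : bs₁.map (fun r => r.getD 0 0) =
          (aliveP l (1 - 1)).map (fun p => p.1 + 1) := by
        rw [show (1 : Int) - 1 = 0 from rfl, aliveP_zero l hl, enumerate_heads]
        exact hheads₁
      have hmain := aRounds_eq l k Mx r hl hrhi hr1 hr2 1 bs₁ (by omega) (by omega) heads1
      rw [show (1 : Int) - 1 = 0 from rfl, aliveP_zero l hl, PySem.List.map_snd_enumerate,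
        Scnt_one l hl] at hmain
      rw [hmain]
      exact (b_value l k r hl hr1 hr2).symm
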